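-- pv_equiv track=rewrite | github.com/xupeng211/FootballPrediction | scripts/advanced_syntax_fixer.py | _fix_unclosed_strings
-- ===== SOURCE A (Python) =====
-- def _fix_unclosed_strings(content: str) -> str:
--     """修复未闭合的字符串"""
--     lines = content.split('\n')
--     fixed_lines = []
--
--     in_string = False
--     string_char = None
--     escape_next = False
--
--     for line in lines:
--         fixed_line = []
--         for char in line:
--             if escape_next:
--                 escape_next = False
--                 fixed_line.append(char)
--                 continue
--
--             if char == '\\':
--                 escape_next = True
--                 fixed_line.append(char)
--             elif char in ('"', "'") and not in_string:
--                 in_string = True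
--                 string_char = char
--                 fixed_line.append(char)
--             elif char == string_char and in_string:
--                 in_string = False
--                 string_char = None
--                 fixed_line.append(char)
--             else:
--                 fixed_line.append(char)
--
--         # 行结束时如果字符串未闭合，添加闭合
--         if in_string and string_char:
--             fixed_line.append(string_char)
--             in_string = False
--             string_char = None
--
--         fixed_lines.append(''.join(fixed_line))
--
--     return '\n'.join(fixed_lines)
-- ===== SOURCE B (Python) =====
-- def _fix_unclosed_strings(content: str) -> str:
--     """Close unclosed string literals per line: one flat pass over the text,
--     a single `quote` state variable instead of split('\n')/join plus an
--     (in_string, string_char) pair."""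
--     out = []
--     quote = None            # currently open quote char, or None
--     escape_next = False
--     for ch in content:
--         if ch == '\n':
--             if quote is not None:
--                 out.append(quote)
--                 quote = None
--             out.append(ch)
--             continue
--         if escape_next:
--             escape_next = False
--         elif ch == '\\':
--             escape_next = True
--         elif quote is None and ch in ('"', "'"):
--             quote = ch
--         elif ch == quote:
--             quote = None
--         out.append(ch)
--     if quote is not None:
--         out.append(quote)
--     return ''.join(out)
-- ===== Notes on version B (the rewrite author's own statement) =====
-- stated objective: simpler
-- what changed: Replaced the split-into-lines/per-line-buffer/join pipeline and the redundant (in_string, string_char) state pair with one flat pass over the characters using a single Optional quote-state variable, handling newlines inline.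
import Mathlib
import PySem

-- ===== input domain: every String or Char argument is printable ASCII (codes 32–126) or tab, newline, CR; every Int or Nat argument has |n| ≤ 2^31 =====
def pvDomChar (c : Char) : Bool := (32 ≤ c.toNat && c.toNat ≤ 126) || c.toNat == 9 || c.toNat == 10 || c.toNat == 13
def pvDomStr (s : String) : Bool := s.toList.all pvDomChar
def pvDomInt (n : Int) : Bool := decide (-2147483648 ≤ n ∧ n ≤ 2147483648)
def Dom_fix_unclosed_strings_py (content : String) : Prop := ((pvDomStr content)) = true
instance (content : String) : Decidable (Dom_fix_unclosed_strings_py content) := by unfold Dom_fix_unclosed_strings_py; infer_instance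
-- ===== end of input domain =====

-- B replaces A's split-into-lines/per-line/join pipeline and (in_string, string_char) state pair
-- with one flat pass over the characters using a single Option-quote state variable (same output, same cost).


-- ===== PORT A =====
-- inner loop body of A: 'for char in line' (fixed_line accumulates, state threads)
def pvA_step (st : List Char × Bool × Option Char × Bool) (c : Char) :
    List Char × Bool × Option Char × Bool :=
  match st with
  | (fixed_line, in_string, string_char, escape_next) =>
    if escape_next then (fixed_line ++ [c], in_string, string_char, false)
    else if c = '\\' then (fixed_line ++ [c], in_string, string_char, true)
    else if (c = '"' ∨ c = '\'') ∧ in_string = false then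
      (fixed_line ++ [c], true, some c, escape_next)
    else if string_char = some c ∧ in_string = true then
      (fixed_line ++ [c], false, none, escape_next)
    else (fixed_line ++ [c], in_string, string_char, escape_next)

-- outer loop body of A: 'for line in lines' (process the line, then close an open string)
def pvA_line (st : List (List Char) × Bool × Option Char × Bool) (line : List Char) :
    List (List Char) × Bool × Option Char × Bool :=
  match st with
  | (fixed_lines, in_string, string_char, escape_next) =>
    match line.foldl pvA_step ([], in_string, string_char, escape_next) with
    | (fl, true, some q, esc') => (fixed_lines ++ [fl ++ [q]], false, none, esc')
    | (fl, instr', sc', esc') => (fixed_lines ++ [fl], instr', sc', esc')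

def fix_unclosed_strings_py (content : String) : String :=
  let lines := PySem.Chars.splitOn content.toList ['\n']
  match lines.foldl pvA_line ([], false, none, false) with
  | (fixed_lines, _, _, _) => String.mk (PySem.Chars.join ['\n'] fixed_lines)

-- ===== PORT B =====
-- loop body of B: one flat pass; '\n' closes an open quote inline, escape state carries over it
def pvB_step (st : List Char × Option Char × Bool) (c : Char) :
    List Char × Option Char × Bool :=
  match st with
  | (out, quote, escape_next) =>
    if c = '\n' then
      match quote with
      | some q => (out ++ [q, c], none, escape_next)
      | none => (out ++ [c], none, escape_next)
    else if escape_next then (out ++ [c], quote, false)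
    else if c = '\\' then (out ++ [c], quote, true)
    else if quote = none ∧ (c = '"' ∨ c = '\'') then (out ++ [c], some c, escape_next)
    else if quote = some c then (out ++ [c], none, escape_next)
    else (out ++ [c], quote, escape_next)

def fix_unclosed_strings_py_alt (content : String) : String :=
  match content.toList.foldl pvB_step ([], none, false) with
  | (out, some q, _) => String.mk (out ++ [q])
  | (out, none, _) => String.mk out

-- ===== PRECONDITION & SPEC =====
def Spec_fix_unclosed_strings_py (content : String) (out : String) : Prop := out = fix_unclosed_strings_py_alt content
instance (content : String) (out : String) : Decidable (Spec_fix_unclosed_strings_py content out) := by unfold Spec_fix_unclosed_strings_py; infer_instance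

-- ===== CLAIM (what is proved, stated in full; the proofs are below) =====
def Claim_equal_fix_unclosed_strings_py : Prop := ∀ (content : String), Dom_fix_unclosed_strings_py content → Spec_fix_unclosed_strings_py content (fix_unclosed_strings_py content)

-- ===== LEMMAS AND PROOFS =====

-- simple recursive characterisation of splitting on '\n'
def pvSplit : List Char → List (List Char)
  | [] => [[]]
  | c :: rest => if c = '\n' then [] :: pvSplit rest else (pvSplit rest).modifyHead (c :: ·)

theorem pvSplit_ne_nil (cs : List Char) : pvSplit cs ≠ [] := by
  cases cs with
  | nil => simp [pvSplit]
  | cons c rest =>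
    simp only [pvSplit]
    split_ifs
    · simp
    · cases h : pvSplit rest with
      | nil => exact absurd h (pvSplit_ne_nil rest)
      | cons a t => simp

theorem pvGo_eq (fuel : Nat) (l cur : List Char) (acc : List (List Char))
    (h : l.length ≤ fuel) :
    PySem.Chars.splitOn.go ['\n'] fuel l cur acc
      = acc.reverse ++ (pvSplit l).modifyHead (cur.reverse ++ ·) := by
  induction fuel generalizing l cur acc with
  | zero =>
    have : l = [] := List.length_eq_zero_iff.mp (Nat.le_zero.mp h)
    subst this
    simp [PySem.Chars.splitOn.go, pvSplit]
  | succ n ih =>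
    cases l with
    | nil => simp [PySem.Chars.splitOn.go, pvSplit]
    | cons c rest =>
      simp only [PySem.Chars.splitOn.go]
      by_cases hc : c = '\n'
      · subst hc
        have hp : List.isPrefixOf ['\n'] ('\n' :: rest) = true := by
          simp [List.isPrefixOf]
        simp only [hp, if_pos, List.length_cons, List.length_nil, List.drop_succ_cons,
          List.drop_zero]
        rw [ih rest [] (cur.reverse :: acc) (by simpa using Nat.le_of_succ_le_succ h)]
        simp only [pvSplit, if_pos]
        cases h' : pvSplit rest <;> simp
      · have hp : List.isPrefixOf ['\n'] (c :: rest) = false := by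
          simp [List.isPrefixOf]
          exact fun h => hc h.symm
        simp only [hp, Bool.false_eq_true, if_false]
        rw [ih rest (c :: cur) acc (by simpa using Nat.le_of_succ_le_succ h)]
        simp only [pvSplit, if_neg hc]
        cases h' : pvSplit rest with
        | nil => exact absurd h' (pvSplit_ne_nil rest)
        | cons a t => simp

theorem pvSplitOn_eq (cs : List Char) : PySem.Chars.splitOn cs ['\n'] = pvSplit cs := by
  unfold PySem.Chars.splitOn
  rw [pvGo_eq _ _ _ _ (Nat.le_succ_of_le (Nat.le_refl _))]
  cases h : pvSplit cs with
  | nil => exact absurd h (pvSplit_ne_nil cs)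
  | cons a t => simp

-- every branch of pvA_step appends exactly the read character
theorem pvA_step_acc (st : List Char × Bool × Option Char × Bool) (c : Char) :
    pvA_step st c = (st.1 ++ (pvA_step ([], st.2.1, st.2.2.1, st.2.2.2) c).1,
                     (pvA_step ([], st.2.1, st.2.2.1, st.2.2.2) c).2) := by
  obtain ⟨a, b, o, e⟩ := st
  simp only [pvA_step]
  split_ifs <;> simp

theorem pvA_fold_acc (l : List Char) (acc : List Char) (b : Bool) (o : Option Char) (e : Bool) :
    l.foldl pvA_step (acc, b, o, e)
      = (acc ++ (l.foldl pvA_step ([], b, o, e)).1, (l.foldl pvA_step ([], b, o, e)).2) := by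
  induction l generalizing acc b o e with
  | nil => simp
  | cons c rest ih =>
    simp only [List.foldl_cons]
    rw [pvA_step_acc (acc, b, o, e) c, pvA_step_acc ([], b, o, e) c]
    obtain ⟨fl, b', o', e'⟩ := (pvA_step ([], b, o, e) c)
    simp only [List.nil_append]
    rw [ih (acc ++ fl) b' o' e', ih fl b' o' e']
    simp

-- pvA_line appends exactly one line and its lines-accumulator is a pure prefix
theorem pvA_line_acc (st : List (List Char) × Bool × Option Char × Bool) (line : List Char) :
    pvA_line st line
      = (st.1 ++ (pvA_line ([], st.2.1, st.2.2.1, st.2.2.2) line).1,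
         (pvA_line ([], st.2.1, st.2.2.1, st.2.2.2) line).2) := by
  obtain ⟨a, b, o, e⟩ := st
  simp only [pvA_line]
  rcases h : line.foldl pvA_step ([], b, o, e) with ⟨fl, b', o', e'⟩
  cases b' <;> cases o' <;> simp

theorem pvA_linefold_acc (ls : List (List Char)) (acc : List (List Char)) (b : Bool)
    (o : Option Char) (e : Bool) :
    ls.foldl pvA_line (acc, b, o, e)
      = (acc ++ (ls.foldl pvA_line ([], b, o, e)).1, (ls.foldl pvA_line ([], b, o, e)).2) := by
  induction ls generalizing acc b o e with
  | nil => simp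
  | cons l rest ih =>
    simp only [List.foldl_cons]
    rw [pvA_line_acc (acc, b, o, e) l, pvA_line_acc ([], b, o, e) l]
    obtain ⟨fl, b', o', e'⟩ := (pvA_line ([], b, o, e) l)
    simp only [List.nil_append]
    rw [ih (acc ++ fl) b' o' e', ih fl b' o' e']
    simp

theorem pvA_line_one (b : Bool) (o : Option Char) (e : Bool) (line : List Char) :
    ∃ x, (pvA_line ([], b, o, e) line).1 = [x] := by
  simp only [pvA_line]
  rcases line.foldl pvA_step ([], b, o, e) with ⟨fl, b', o', e'⟩
  cases b' <;> cases o' <;> simp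

theorem pvA_linefold_ne_nil (ls : List (List Char)) (b : Bool) (o : Option Char) (e : Bool)
    (h : ls ≠ []) : (ls.foldl pvA_line ([], b, o, e)).1 ≠ [] := by
  cases ls with
  | nil => exact absurd rfl h
  | cons l rest =>
    obtain ⟨x, hx⟩ := pvA_line_one b o e l
    simp only [List.foldl_cons]
    rcases hl : pvA_line ([], b, o, e) l with ⟨fl, b', o', e'⟩
    rw [hl] at hx
    rw [pvA_linefold_acc rest fl b' o' e']
    simp_all

-- pvB_step appends a pure prefix too
theorem pvB_step_acc (st : List Char × Option Char × Bool) (c : Char) :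
    pvB_step st c = (st.1 ++ (pvB_step ([], st.2.1, st.2.2) c).1,
                     (pvB_step ([], st.2.1, st.2.2) c).2) := by
  obtain ⟨a, o, e⟩ := st
  simp only [pvB_step]
  split_ifs <;> cases o <;> simp_all

theorem pvB_fold_acc (l : List Char) (acc : List Char) (o : Option Char) (e : Bool) :
    l.foldl pvB_step (acc, o, e)
      = (acc ++ (l.foldl pvB_step ([], o, e)).1, (l.foldl pvB_step ([], o, e)).2) := by
  induction l generalizing acc o e with
  | nil => simp
  | cons c rest ih =>
    simp only [List.foldl_cons]
    rw [pvB_step_acc (acc, o, e) c, pvB_step_acc ([], o, e) c]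
    obtain ⟨fl, o', e'⟩ := (pvB_step ([], o, e) c)
    simp only [List.nil_append]
    rw [ih (acc ++ fl) o' e', ih fl o' e']
    simp

def pvCloseChars : Option Char → List Char
  | some q => [q]
  | none => []

-- B's closing step, as a function of the final fold state
def pvBClose : List Char × Option Char × Bool → List Char
  | (out, some q, _) => out ++ [q]
  | (out, none, _) => out

theorem pvBClose_append (a x : List Char) (q : Option Char) (e : Bool) :
    pvBClose (a ++ x, q, e) = a ++ pvBClose (x, q, e) := by
  cases q <;> simp [pvBClose]

-- for a non-newline character, A's inner step and B's step read the same char, emit it,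
-- and move to the same (synchronised) state
theorem pvStep_sync (c : Char) (sc : Option Char) (esc : Bool) (hc : c ≠ '\n') :
    ∃ sc1 esc1, pvA_step ([], sc.isSome, sc, esc) c = ([c], sc1.isSome, sc1, esc1)
      ∧ pvB_step ([], sc, esc) c = ([c], sc1, esc1) := by
  cases esc with
  | true => exact ⟨sc, false, by simp [pvA_step], by simp [pvB_step, hc]⟩
  | false =>
    by_cases hb : c = '\\'
    · exact ⟨sc, true, by simp [pvA_step, hb], by simp [pvB_step, hc, hb]⟩
    · by_cases hq : c = '"' ∨ c = '\''
      · cases sc with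
        | none =>
          exact ⟨some c, false, by simp [pvA_step, hb, hq], by simp [pvB_step, hc, hb, hq]⟩
        | some q =>
          by_cases hqc : q = c
          · exact ⟨none, false, by simp [pvA_step, hb, hq, hqc],
              by simp [pvB_step, hc, hb, hqc]⟩
          · exact ⟨some q, false, by simp [pvA_step, hb, hq, hqc],
              by simp [pvB_step, hc, hb, hq, hqc]⟩
      · cases sc with
        | none => exact ⟨none, false, by simp [pvA_step, hb, hq], by simp [pvB_step, hc, hb, hq]⟩
        | some q =>
          by_cases hqc : q = c
          · exact ⟨none, false, by simp [pvA_step, hb, hq, hqc],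
              by simp [pvB_step, hc, hb, hqc]⟩
          · exact ⟨some q, false, by simp [pvA_step, hb, hq, hqc],
              by simp [pvB_step, hc, hb, hq, hqc]⟩

-- processing a line c :: h0 is: emit c, then process h0 from the stepped state
theorem pvA_line_cons (c : Char) (b b1 : Bool) (o o1 : Option Char) (e e1 : Bool) (h0 : List Char)
    (hstep : pvA_step ([], b, o, e) c = ([c], b1, o1, e1)) :
    pvA_line ([], b, o, e) (c :: h0)
      = ((pvA_line ([], b1, o1, e1) h0).1.modifyHead (c :: ·),
         (pvA_line ([], b1, o1, e1) h0).2) := by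
  simp only [pvA_line, List.foldl_cons, hstep]
  rw [pvA_fold_acc h0 [c] b1 o1 e1]
  rcases h0.foldl pvA_step ([], b1, o1, e1) with ⟨X, b', o', e'⟩
  cases b' <;> cases o' <;> simp

theorem pvJoin_head (c : Char) (y : List Char) (Z : List (List Char)) :
    PySem.Chars.join ['\n'] ((c :: y) :: Z) = c :: PySem.Chars.join ['\n'] (y :: Z) := by
  cases Z with
  | nil => rw [PySem.Chars.join_singleton, PySem.Chars.join_singleton]
  | cons z t => rw [PySem.Chars.join_cons_cons, PySem.Chars.join_cons_cons]; simp

-- A's empty-line close and B's newline step agree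
theorem pvA_line_nil (sc : Option Char) (esc : Bool) :
    pvA_line ([], sc.isSome, sc, esc) [] = ([pvCloseChars sc], false, none, esc) := by
  cases sc <;> simp [pvA_line, pvCloseChars]

theorem pvB_step_newline (sc : Option Char) (esc : Bool) :
    pvB_step ([], sc, esc) '\n' = (pvCloseChars sc ++ ['\n'], none, esc) := by
  cases sc <;> simp [pvB_step, pvCloseChars]

-- the heart: A's per-line pipeline over pvSplit equals B's flat pass, for synchronised states
theorem pvMain (cs : List Char) (sc : Option Char) (esc : Bool) :
    PySem.Chars.join ['\n'] ((pvSplit cs).foldl pvA_line ([], sc.isSome, sc, esc)).1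
      = pvBClose (cs.foldl pvB_step ([], sc, esc)) := by
  induction cs generalizing sc esc with
  | nil =>
    cases sc <;>
      simp [pvSplit, pvA_line, pvBClose, PySem.Chars.join_singleton]
  | cons c rest ih =>
    by_cases hc : c = '\n'
    · subst hc
      have hsplit : pvSplit ('\n' :: rest) = [] :: pvSplit rest := by simp [pvSplit]
      rw [hsplit, List.foldl_cons, pvA_line_nil, List.foldl_cons, pvB_step_newline]
      rw [pvA_linefold_acc (pvSplit rest) [pvCloseChars sc] false none esc]
      rw [pvB_fold_acc rest (pvCloseChars sc ++ ['\n']) none esc]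
      have hne := pvA_linefold_ne_nil (pvSplit rest) false none esc (pvSplit_ne_nil rest)
      have ih' := ih none esc
      simp only [Option.isSome_none] at ih'
      rcases hout : ((pvSplit rest).foldl pvA_line ([], false, none, esc)).1 with _ | ⟨y, Z⟩
      · exact absurd hout hne
      rcases hB : rest.foldl pvB_step ([], none, esc) with ⟨outB, qB, eB⟩
      rw [hout, hB] at ih'
      rw [List.singleton_append, PySem.Chars.join_cons_cons]
      rw [List.append_assoc, pvBClose_append]
      rw [ih']
      simp [pvCloseChars]
    · obtain ⟨sc1, esc1, hA, hB⟩ := pvStep_sync c sc esc hc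
      rcases hs : pvSplit rest with _ | ⟨h0, t0⟩
      · exact absurd hs (pvSplit_ne_nil rest)
      have ih' := ih sc1 esc1
      rw [hs] at ih'
      simp only [pvSplit, if_neg hc, hs, List.modifyHead_cons, List.foldl_cons]
      rw [pvA_line_cons c sc.isSome sc1.isSome sc sc1 esc esc1 h0 hA]
      obtain ⟨y, hy⟩ := pvA_line_one sc1.isSome sc1 esc1 h0
      rcases hl : pvA_line ([], sc1.isSome, sc1, esc1) h0 with ⟨Y, b2, o2, e2⟩
      rw [hl] at hy
      simp only at hy
      subst hy
      simp only [List.modifyHead_cons]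
      rw [pvA_linefold_acc t0 [c :: y] b2 o2 e2]
      rw [hB, pvB_fold_acc rest [c] sc1 esc1]
      rw [pvBClose_append]
      -- left side: join ((c :: y) :: Z) = c :: join (y :: Z), then ih'
      rw [List.singleton_append, pvJoin_head]
      rw [List.foldl_cons, hl, pvA_linefold_acc t0 [y] b2 o2 e2] at ih'
      rw [List.singleton_append] at ih'
      rw [ih']
      simp

-- ===== VERDICT (by name: the statement is the Claim_ definition above) =====
theorem fix_unclosed_strings_py_spec : Claim_equal_fix_unclosed_strings_py := by
  intro content _
  unfold Spec_fix_unclosed_strings_py fix_unclosed_strings_py fix_unclosed_strings_py_alt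
  rw [pvSplitOn_eq]
  have h := pvMain content.toList none false
  simp only [Option.isSome_none] at h
  rcases hA : (pvSplit content.toList).foldl pvA_line ([], false, none, false) with ⟨fls, b, o, e⟩
  rcases hB : content.toList.foldl pvB_step ([], none, false) with ⟨out, q, e'⟩
  rw [hA, hB] at h
  cases q <;> simp_all [pvBClose]
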